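-- pv_equiv track=rewrite | github.com/Tulvinskis/education_ib11_python | 13/13-06.py | word_occurrences
-- ===== SOURCE A (Python) =====
-- def word_occurrences(text):
--   """
--   Находит порядковые номера вхождений слов в тексте.
--
--   Args:
--     text: Строка текста.
--
--   Returns:
--     Список номеров вхождений для каждого слова.
--   """
--
--   word_counts = {}
--   occurrences = []
--   for word in text.split():
--     if word not in word_counts:
--       word_counts[word] = 0
--     word_counts[word] += 1
--     occurrences.append(word_counts[word])
--
--   return occurrences
-- ===== SOURCE B (Python) =====
-- def word_occurrences(text):
--   words = text.split()
--   return [words[:i + 1].count(w) for i, w in enumerate(words)]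
-- ===== Notes on version B (the rewrite author's own statement) =====
-- stated objective: simpler
-- what changed: Replaces the running dict of word counts with a stateless comprehension that counts each word in the prefix slice words[:i+1].
import Mathlib
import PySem

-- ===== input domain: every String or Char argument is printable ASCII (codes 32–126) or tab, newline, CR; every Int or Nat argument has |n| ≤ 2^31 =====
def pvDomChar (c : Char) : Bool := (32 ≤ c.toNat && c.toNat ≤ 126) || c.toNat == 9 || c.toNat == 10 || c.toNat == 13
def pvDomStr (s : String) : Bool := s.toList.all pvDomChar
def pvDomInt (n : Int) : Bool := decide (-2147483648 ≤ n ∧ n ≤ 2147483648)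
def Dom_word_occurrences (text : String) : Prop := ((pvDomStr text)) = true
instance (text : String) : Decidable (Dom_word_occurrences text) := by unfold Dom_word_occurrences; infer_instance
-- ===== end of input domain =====

-- B replaces A's running dict of counts with a stateless prefix-count comprehension (simpler; not faster).

-- ===== PORT A =====
def word_occurrences (text : String) : List Int :=
  let r := (PySem.Str.split₀ text).foldl
    (fun (st : PySem.Dict String Int × List Int) word =>
      let wc0 := if st.1.contains word then st.1 else st.1.insert word 0
      -- word_counts[word] += 1: the key is present here, so d[word] is d.getD word 0
      let wc := wc0.insert word (wc0.getD word 0 + 1)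
      (wc, st.2 ++ [wc.getD word 0]))
    (PySem.Dict.empty, [])
  r.2

-- ===== PORT B =====
def word_occurrences_alt (text : String) : List Int :=
  let words := PySem.Str.split₀ text
  (PySem.List.enumerate words).map
    (fun p => ((PySem.List.slice words none (some (p.1 + 1))).count p.2 : Int))

-- ===== PRECONDITION & SPEC =====
def Spec_word_occurrences (text : String) (out : List Int) : Prop := out = word_occurrences_alt text
instance (text : String) (out : List Int) : Decidable (Spec_word_occurrences text out) := by unfold Spec_word_occurrences; infer_instance

-- ===== CLAIM (what is proved, stated in full; the proofs are below) =====
def Claim_equal_word_occurrences : Prop := ∀ (text : String), Dom_word_occurrences text → Spec_word_occurrences text (word_occurrences text)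

-- ===== LEMMAS AND PROOFS =====

-- abstract description of A's output: head gets f w + 1, tail continues with f bumped at w
def wordSpec : List String → (String → Int) → List Int
  | [], _ => []
  | w :: ws, f => (f w + 1) :: wordSpec ws (fun v => if v = w then f w + 1 else f v)

lemma loopA (ws : List String) (d : PySem.Dict String Int) (acc : List Int)
    (f : String → Int) (hf : ∀ v, d.getD v 0 = f v) :
    (ws.foldl
      (fun (st : PySem.Dict String Int × List Int) word =>
        let wc0 := if st.1.contains word then st.1 else st.1.insert word 0
        let wc := wc0.insert word (wc0.getD word 0 + 1)
        (wc, st.2 ++ [wc.getD word 0]))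
      (d, acc)).2 = acc ++ wordSpec ws f := by
  induction ws generalizing d acc f with
  | nil => simp [wordSpec]
  | cons w ws ih =>
    have hwc0 : ∀ v, (if d.contains w then d else d.insert w 0).getD v 0 = f v := by
      intro v
      split
      · exact hf v
      · next hc =>
        rw [PySem.Dict.getD_insert]
        split
        · next h =>
          subst h
          rw [← hf v]
          exact (PySem.Dict.getD_of_not_contains (d := d) (k := v) 0 (by simpa using hc)).symm
        · exact hf v
    simp only [List.foldl_cons, wordSpec]
    rw [ih _ _ (fun v => if v = w then f w + 1 else f v) ?_]
    · rw [PySem.Dict.getD_insert_self, hwc0 w]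
      simp
    · intro v
      rw [PySem.Dict.getD_insert]
      split <;> simp_all

lemma loopB (pre ws : List String) (f : String → Int)
    (hf : ∀ v, f v = (pre.count v : Int)) :
    wordSpec ws f = (PySem.List.enumerate ws pre.length).map
      (fun p => (((pre ++ ws).take (p.1.toNat + 1)).count p.2 : Int)) := by
  induction ws generalizing pre f with
  | nil => simp [wordSpec]
  | cons w ws ih =>
    rw [wordSpec, PySem.List.enumerate_cons, List.map_cons]
    congr 1
    · have : (pre ++ w :: ws).take (((pre.length : Int)).toNat + 1) = pre ++ [w] := by
        simp [List.take_append]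
      simp only [this, List.count_append, hf w]
      simp
    · have := ih (pre ++ [w]) (fun v => if v = w then f w + 1 else f v) ?_
      · rw [this]
        simp only [List.append_assoc, List.singleton_append, List.length_append,
          List.length_cons, List.length_nil]
        push_cast
        ring_nf
      · intro v
        simp only [List.count_append, List.count_cons, List.count_nil]
        split
        · next h => subst h; rw [hf v]; simp
        · next h => rw [hf v]; simp [Ne.symm h]

lemma slice_take (ws : List String) (k : Nat) :
    PySem.List.slice ws none (some ((k : Int) + 1)) = ws.take (k + 1) := by
  have : ((k : Int) + 1) = ((k + 1 : Nat) : Int) := by push_cast; ring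
  rw [this, PySem.List.slice_to_natCast]

-- ===== VERDICT (by name: the statement is the Claim_ definition above) =====
theorem word_occurrences_spec : Claim_equal_word_occurrences := by
  intro text _
  unfold Spec_word_occurrences word_occurrences word_occurrences_alt
  rw [loopA _ _ _ (fun _ => 0) (fun v => by simp [PySem.Dict.getD_empty])]
  rw [loopB [] _ (fun _ => 0) (fun v => by simp)]
  simp only [List.nil_append, List.length_nil]
  apply List.map_congr_left
  intro p hp
  rw [PySem.List.mem_enumerate_iff] at hp
  obtain ⟨k, hk, rfl⟩ := hp
  simp [slice_take]
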